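-- pv_equiv track=rewrite | github.com/nihalkenkre/maldev_tools | hash/fold_hash.py | hash_32
-- ===== SOURCE A (Python) =====
-- def hash_32(input):
--     hash = 0
--
--     input_bytes = bytes(input, encoding='utf-8')
--     input_bytes_len = len(input_bytes)
--
--     i = 0
--     while i < input_bytes_len:
--         current_fold = input_bytes[i]
--         current_fold <<= 8
--
--         if i + 1 < input_bytes_len:
--             current_fold |= input_bytes[i + 1]
--             current_fold <<= 8
--
--         hash += current_fold
--
--         i += 2
--
--     return hash
-- ===== SOURCE B (Python) =====
-- def hash_32(input):
--     input_bytes = bytes(input, encoding='utf-8')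
--     evens = input_bytes[0::2]
--     odds = input_bytes[1::2]
--     h = sum(odds) << 8
--     if len(input_bytes) % 2 == 1:
--         h += (sum(evens[:-1]) << 16) + (evens[-1] << 8)
--     else:
--         h += sum(evens) << 16
--     return h
-- ===== Notes on version B (the rewrite author's own statement) =====
-- stated objective: faster
-- what changed: Replaced the index-stepping while loop that folds byte pairs with OR/shift by two parity-strided slices whose flat sums are shifted once (evens<<16, odds<<8, with the trailing odd byte peeled at <<8), using C-level slicing and sum instead of a per-pair Python loop.
import Mathlib
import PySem

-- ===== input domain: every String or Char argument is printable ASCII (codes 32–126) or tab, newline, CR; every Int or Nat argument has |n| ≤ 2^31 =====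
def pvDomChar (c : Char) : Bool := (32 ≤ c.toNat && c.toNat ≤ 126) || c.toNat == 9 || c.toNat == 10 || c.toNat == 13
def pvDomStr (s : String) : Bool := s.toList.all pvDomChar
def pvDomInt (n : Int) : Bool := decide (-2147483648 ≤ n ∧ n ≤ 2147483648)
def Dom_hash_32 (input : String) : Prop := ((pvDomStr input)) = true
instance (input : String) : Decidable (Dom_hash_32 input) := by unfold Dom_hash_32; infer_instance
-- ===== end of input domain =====

-- B folds the pair loop into two parity-strided slice sums shifted once each (measured constant-factor speedup in Python).

-- ===== PORT A =====
-- bytes(input, encoding='utf-8'): exact on the ASCII domain (one byte per char, value = code point)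
def pvBytes (input : String) : List Int := input.toList.map (fun c => ((c.toNat : Int)))

-- the while loop: consumes two bytes per iteration ((b0<<8 | b1)<<8), one byte ((b0<<8)) at an odd tail
def pvFoldLoop : List Int → Int
  | [] => 0
  | [b0] => b0 <<< (8:Nat)
  | b0 :: b1 :: rest => (PySem.Int.bor (b0 <<< (8:Nat)) b1) <<< (8:Nat) + pvFoldLoop rest

def hash_32 (input : String) : Int := pvFoldLoop (pvBytes input)

-- ===== PORT B =====
-- xs[0::2] (step-2 slice, ported by hand; exact)
def pvEvens : List Int → List Int
  | [] => []
  | [x] => [x]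
  | x :: _ :: r => x :: pvEvens r

-- xs[1::2] (step-2 slice starting at 1, ported by hand; exact)
def pvOdds : List Int → List Int
  | [] => []
  | [_] => []
  | _ :: y :: r => y :: pvOdds r

def hash_32_alt (input : String) : Int :=
  let input_bytes := pvBytes input
  let evens := pvEvens input_bytes
  let odds := pvOdds input_bytes
  let h := odds.sum <<< (8:Nat)
  if input_bytes.length % 2 == 1 then
    -- evens[-1]: evens is nonempty whenever the length is odd, so getLastD 0 is exact here
    h + (evens.dropLast.sum <<< (16:Nat)) + (evens.getLastD 0 <<< (8:Nat))
  else
    h + (evens.sum <<< (16:Nat))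

-- ===== PRECONDITION & SPEC =====
def Spec_hash_32 (input : String) (out : Int) : Prop := out = hash_32_alt input
instance (input : String) (out : Int) : Decidable (Spec_hash_32 input out) := by unfold Spec_hash_32; infer_instance

-- ===== CLAIM (what is proved, stated in full; the proofs are below) =====
def Claim_equal_hash_32 : Prop := ∀ (input : String), Dom_hash_32 input → Spec_hash_32 input (hash_32 input)

-- ===== LEMMAS AND PROOFS =====

-- the body of B after the bytes construction, as a function of the byte list
def altBody (input_bytes : List Int) : Int :=
  let evens := pvEvens input_bytes
  let odds := pvOdds input_bytes
  let h := odds.sum <<< (8:Nat)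
  if input_bytes.length % 2 == 1 then
    h + (evens.dropLast.sum <<< (16:Nat)) + (evens.getLastD 0 <<< (8:Nat))
  else
    h + (evens.sum <<< (16:Nat))

-- (b0 << 8) | b1 = b0*256 + b1 for a byte-sized b1: the OR never overlaps the shifted bits
lemma lorStep (x y : Int) (hx : 0 ≤ x) (hy0 : 0 ≤ y) (hy : y < 256) :
    PySem.Int.bor (x <<< (8:Nat)) y = x * 256 + y := by
  rw [Int.shiftLeft_eq]
  rw [PySem.Int.bor_of_nonneg (by positivity) hy0]
  have h1 : (x * 2 ^ 8).toNat = 2 ^ 8 * x.toNat := by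
    rw [Int.toNat_mul hx (by positivity), mul_comm]; rfl
  rw [h1, ← Nat.two_pow_add_eq_or_of_lt (by omega : y.toNat < 2 ^ 8)]
  push_cast
  rw [Int.toNat_of_nonneg hx, Int.toNat_of_nonneg hy0]
  ring

lemma pvEvens_ne_nil (l : List Int) (h : l ≠ []) : pvEvens l ≠ [] := by
  match l with
  | [x] => simp [pvEvens]
  | x :: _ :: r => simp [pvEvens]

lemma altBody_eq_pvFoldLoop (l : List Int) (h : ∀ b ∈ l, 0 ≤ b ∧ b < 256) :
    altBody l = pvFoldLoop l := by
  induction l using pvFoldLoop.induct with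
  | case1 => simp [altBody, pvEvens, pvOdds, pvFoldLoop, Int.shiftLeft_eq]
  | case2 b0 => simp [altBody, pvEvens, pvOdds, pvFoldLoop, Int.shiftLeft_eq]
  | case3 b0 b1 r ih =>
    have hr : ∀ b ∈ r, 0 ≤ b ∧ b < 256 := fun b hb => h b (by simp [hb])
    have ih' := ih hr
    obtain ⟨h0, h0'⟩ := h b0 (by simp)
    obtain ⟨h1, h1'⟩ := h b1 (by simp)
    rw [pvFoldLoop, lorStep b0 b1 h0 h1 h1', ← ih']
    simp only [altBody, pvEvens, pvOdds, Int.shiftLeft_eq, List.length_cons, List.sum_cons]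
    have hpar : (r.length + 1 + 1) % 2 = r.length % 2 := by omega
    rw [hpar]
    by_cases hp : r.length % 2 = 1
    · have hrne : r ≠ [] := by intro hnil; simp [hnil] at hp
      have hene := pvEvens_ne_nil r hrne
      simp only [hp, beq_self_eq_true, if_pos]
      have hgl : (b0 :: pvEvens r).getLastD 0 = (pvEvens r).getLastD 0 := by
        rw [List.getLastD_cons, List.getLastD_eq_getLast?, List.getLastD_eq_getLast?,
            List.getLast?_eq_some_getLast hene]
        rfl
      rw [List.dropLast_cons_of_ne_nil hene, List.sum_cons, hgl]
      ring
    · simp only [beq_iff_eq, hp, if_false]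
      ring

-- ===== VERDICT (by name: the statement is the Claim_ definition above) =====
theorem hash_32_spec : Claim_equal_hash_32 := by
  intro input hdom
  have hb : ∀ b ∈ pvBytes input, 0 ≤ b ∧ b < 256 := by
    intro b hbmem
    simp only [pvBytes, List.mem_map] at hbmem
    obtain ⟨c, hc, rfl⟩ := hbmem
    have hdc : pvDomChar c = true := by
      have := List.all_eq_true.mp hdom c hc
      exact this
    simp only [pvDomChar, Bool.or_eq_true, Bool.and_eq_true, decide_eq_true_eq,
      beq_iff_eq] at hdc
    refine ⟨Int.natCast_nonneg _, ?_⟩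
    have : c.toNat < 256 := by omega
    exact_mod_cast this
  show hash_32 input = hash_32_alt input
  calc hash_32 input = pvFoldLoop (pvBytes input) := rfl
    _ = altBody (pvBytes input) := (altBody_eq_pvFoldLoop _ hb).symm
    _ = hash_32_alt input := rfl
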